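-- pv_equiv track=rewrite | github.com/nikhil-2000/advent-of-code-2020 | helperFunctions.py | find_permutations_of_adaptors
-- ===== SOURCE A (Python) =====
-- def find_permutations_of_adaptors(adaptors,current_perm = [0]):
--     if max(current_perm) == max(adaptors):
--         return (current_perm)
--
--     next_perm_1,next_perm_2,next_perm_3= [],[],[]
--     if current_perm[-1] + 1 in adaptors:
--         next_perm = current_perm +  [current_perm[-1] + 1]
--         next_perm_1 = find_permutations_of_adaptors(adaptors,next_perm)
--
--     if current_perm[-1] + 2 in adaptors:
--         next_perm = current_perm +  [current_perm[-1] + 2]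
--         next_perm_2 = find_permutations_of_adaptors(adaptors,next_perm)
--
--     if current_perm[-1] + 3 in adaptors:
--         next_perm = current_perm +  [current_perm[-1] + 3]
--         next_perm_3 = find_permutations_of_adaptors(adaptors,next_perm)
--
--     return next_perm_1 + next_perm_2 + next_perm_3
-- ===== SOURCE B (Python) =====
-- def find_permutations_of_adaptors(adaptors, current_perm=[0]):
--     target = max(adaptors)
--     result = []
--     stack = [current_perm]
--     while stack:
--         chain = stack.pop()
--         if max(chain) == target:
--             result.extend(chain)
--         else:
--             last = chain[-1]
--             for step in (3, 2, 1):
--                 if last + step in adaptors: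
--                     stack.append(chain + [last + step])
--     return result
-- ===== Notes on version B (the rewrite author's own statement) =====
-- stated objective: alternative
-- what changed: Replaces A's recursive DFS (which recomputes max(adaptors) at every call and concatenates three recursive results) by an iterative loop over an explicit stack of partial chains with the target max computed once, pushing +3/+2/+1 extensions so that +1 is popped first to preserve A's preorder output order.
import Mathlib
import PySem

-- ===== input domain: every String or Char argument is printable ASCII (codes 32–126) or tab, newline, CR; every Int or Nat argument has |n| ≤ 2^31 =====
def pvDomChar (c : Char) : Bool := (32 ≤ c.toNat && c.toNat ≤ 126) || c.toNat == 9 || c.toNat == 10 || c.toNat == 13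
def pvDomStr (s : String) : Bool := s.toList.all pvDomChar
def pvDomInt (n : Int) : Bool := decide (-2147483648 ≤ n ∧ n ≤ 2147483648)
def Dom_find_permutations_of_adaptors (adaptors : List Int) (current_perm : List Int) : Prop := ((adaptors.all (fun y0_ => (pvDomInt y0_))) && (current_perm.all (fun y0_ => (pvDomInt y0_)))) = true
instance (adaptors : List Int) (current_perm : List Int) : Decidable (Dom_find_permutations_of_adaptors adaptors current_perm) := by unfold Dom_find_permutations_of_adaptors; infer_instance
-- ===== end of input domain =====

-- B replaces A's recursive DFS by an iterative loop over an explicit stack of partial chains,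
-- computing the target max(adaptors) once (objective: alternative decomposition, same output).

-- a member of a nonempty list is bounded by max(list); used for the termination measures
lemma pv_le_maxD {l : List Int} {x : Int} (hx : x ∈ l) :
    x ≤ (PySem.List.max? l (fun y => y)).getD 0 := by
  rcases h : PySem.List.max? l (fun y => y) with _ | m
  · exact absurd ((PySem.List.max?_eq_none_iff _ _).mp h) (List.ne_nil_of_mem hx)
  · simpa using PySem.List.max?_isMax h _ hx

-- small arithmetic helpers for the termination lemmas (kept omega-free so the definitions'
-- proof closures stay small)
lemma pv_toNat_lt {mx l k : Int} (hk : 1 ≤ k) (h : l + k ≤ mx) :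
    (mx - (l + k)).toNat < (mx - l).toNat := by
  have hlk : l < l + k := lt_add_of_pos_right l (lt_of_lt_of_le Int.zero_lt_one hk)
  have hpos : 0 < mx - l := sub_pos.mpr (lt_of_lt_of_le hlk h)
  exact (Int.toNat_lt_toNat hpos).mpr (sub_lt_sub_left hlk mx)

lemma pv_toNat_pos {a : Int} (h : 0 < a) : 0 < a.toNat :=
  (Int.toNat_lt_toNat h).mpr h

lemma pv_three_lt {e w1 w2 w3 : Nat} (he : 0 < e)
    (h1 : w1 ≤ 4 ^ (e - 1)) (h2 : w2 ≤ 4 ^ (e - 1)) (h3 : w3 ≤ 4 ^ (e - 1)) :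
    w1 + w2 + w3 < 4 ^ e := by
  have hx : 0 < (4:Nat) ^ (e - 1) := pow_pos (by norm_num) _
  have h4 : (4:Nat) ^ e = 4 ^ (e - 1) * 4 := by
    conv_lhs => rw [← Nat.sub_add_cancel he]
    rw [pow_succ]
  calc w1 + w2 + w3 ≤ 4 ^ (e - 1) + 4 ^ (e - 1) + 4 ^ (e - 1) :=
        add_le_add (add_le_add h1 h2) h3
    _ = 4 ^ (e - 1) * 3 := by ring
    _ < 4 ^ (e - 1) * 4 := Nat.mul_lt_mul_of_le_of_lt (le_refl _) (by norm_num) hx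
    _ = 4 ^ e := h4.symm

-- termination lemma for port A's recursion (cited by name in decreasing_by)
lemma pvA_dec {adaptors : List Int} {l k : Int} (hk : 1 ≤ k) (h : l + k ∈ adaptors)
    (cp : List Int) :
    (((PySem.List.max? adaptors (fun x => x)).getD 0) - ((cp ++ [l + k]).getLast?.getD 0)).toNat
      < (((PySem.List.max? adaptors (fun x => x)).getD 0) - l).toNat := by
  simp only [List.getLast?_concat, Option.getD_some]
  exact pv_toNat_lt hk (pv_le_maxD h)

-- ===== PORT A =====
-- Literal port of A's recursive DFS. Python's max of an empty list raises ValueError (reached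
-- when either argument list is empty); those inputs are outside Pre_ and the port returns an
-- empty list there.  max(xs) is PySem.List.max? with the identity key; the .getD 0 only
-- discharges the Option in the nonempty case.
def find_permutations_of_adaptors (adaptors : List Int) (current_perm : List Int) : List Int :=
  if _hne : current_perm = [] ∨ adaptors = [] then []  -- Python raises ValueError here
  else
    let mc := (PySem.List.max? current_perm (fun x => x)).getD 0
    let ma := (PySem.List.max? adaptors (fun x => x)).getD 0
    if mc = ma then current_perm
    else
      let last := current_perm.getLast?.getD 0
      let next_perm_1 := if _h1 : last + 1 ∈ adaptors then
        find_permutations_of_adaptors adaptors (current_perm ++ [last + 1]) else []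
      let next_perm_2 := if _h2 : last + 2 ∈ adaptors then
        find_permutations_of_adaptors adaptors (current_perm ++ [last + 2]) else []
      let next_perm_3 := if _h3 : last + 3 ∈ adaptors then
        find_permutations_of_adaptors adaptors (current_perm ++ [last + 3]) else []
      next_perm_1 ++ next_perm_2 ++ next_perm_3
termination_by (((PySem.List.max? adaptors (fun x => x)).getD 0) - (current_perm.getLast?.getD 0)).toNat
decreasing_by
  · exact pvA_dec (by norm_num) _h1 current_perm
  · exact pvA_dec (by norm_num) _h2 current_perm
  · exact pvA_dec (by norm_num) _h3 current_perm

-- ===== PORT B =====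
-- weight of one partial chain: 4^(distance from its last element to the target)
def pvChainW (ma : Int) (c : List Int) : Nat := 4 ^ ((ma - c.getLast?.getD ma).toNat)
def pvStackW (ma : Int) (s : List (List Int)) : Nat := (s.map (pvChainW ma)).sum

-- one iteration of Source B's while body: pop `chain`, either emit it (its max equals the target)
-- or push its +1/+2/+3 extensions (pushed for step = 3, 2, 1, so +1 ends up on top; the list
-- head is the stack top); an empty popped chain (where Python's max(chain) would raise,
-- outside Pre_) is dropped.  Returns (new stack, new result).
def pvStep (adaptors : List Int) (ma : Int) (chain : List Int) (rest : List (List Int))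
    (result : List Int) : List (List Int) × List Int :=
  if chain = [] then (rest, result)  -- Python raises ValueError here
  else
    let mc := (PySem.List.max? chain (fun x => x)).getD 0
    if mc = ma then (rest, result ++ chain)
    else
      let last := chain.getLast?.getD 0
      ((if last + 1 ∈ adaptors then [chain ++ [last + 1]] else []) ++
       (if last + 2 ∈ adaptors then [chain ++ [last + 2]] else []) ++
       (if last + 3 ∈ adaptors then [chain ++ [last + 3]] else []) ++ rest, result)

-- termination lemma for the stack loop (cited by name in decreasing_by): one step strictly
-- decreases the total stack weight taken at the true maximum of adaptors
lemma pvStep_dec (adaptors : List Int) (ma : Int) (chain : List Int)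
    (rest : List (List Int)) (result : List Int) :
    pvStackW ((PySem.List.max? adaptors (fun x => x)).getD 0)
        (pvStep adaptors ma chain rest result).1
      < pvStackW ((PySem.List.max? adaptors (fun x => x)).getD 0) (chain :: rest) := by
  have hpop : ∀ (m : Int), pvStackW m rest < pvStackW m (chain :: rest) := by
    intro m
    simp only [pvStackW, pvChainW, List.map_cons, List.sum_cons]
    exact Nat.lt_add_of_pos_left (pow_pos (by norm_num) _)
  rw [pvStep]
  by_cases hch : chain = []
  · rw [if_pos hch]; exact hpop _
  · rw [if_neg hch]
    by_cases hmc : (PySem.List.max? chain (fun x => x)).getD 0 = ma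
    · rw [if_pos hmc]; exact hpop _
    · rw [if_neg hmc]
      rcases hlE : chain.getLast? with _ | last
      · exact absurd (List.getLast?_eq_none_iff.mp hlE) hch
      simp only [Option.getD_some]
      generalize hg : (PySem.List.max? adaptors (fun x => x)).getD 0 = mx
      have hub : ∀ y ∈ adaptors, y ≤ mx := fun y hy => hg ▸ pv_le_maxD hy
      simp only [pvStackW, pvChainW, List.map_append, List.sum_append, List.map_cons,
        List.sum_cons, hlE, Option.getD_some]
      have hb : ∀ k : Int, 1 ≤ k →
          ((if last + k ∈ adaptors then [chain ++ [last + k]] else []).map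
              (pvChainW mx)).sum
            ≤ 4 ^ ((mx - last).toNat - 1) := by
        intro k hk
        split_ifs with h
        · simp only [List.map_cons, List.map_nil, List.sum_cons, List.sum_nil, pvChainW,
            List.getLast?_concat, Option.getD_some, Nat.add_zero]
          exact Nat.pow_le_pow_right (by norm_num)
            (Nat.le_sub_one_of_lt (pv_toNat_lt hk (hub _ h)))
        · simp
      by_cases he : mx ≤ last
      · have h1 : ¬ (last + 1 ∈ adaptors) := fun h =>
          absurd (le_trans (hub _ h) he) (not_le.mpr (lt_add_one last))
        have h2 : ¬ (last + 2 ∈ adaptors) := fun h =>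
          absurd (le_trans (hub _ h) he)
            (not_le.mpr (lt_add_of_pos_right last (by norm_num : (0:ℤ) < 2)))
        have h3 : ¬ (last + 3 ∈ adaptors) := fun h =>
          absurd (le_trans (hub _ h) he)
            (not_le.mpr (lt_add_of_pos_right last (by norm_num : (0:ℤ) < 3)))
        simp only [h1, h2, h3, if_neg, not_false_iff, List.map_nil, List.sum_nil,
          Nat.zero_add]
        exact Nat.lt_add_of_pos_left (pow_pos (by norm_num) _)
      · have he' : 0 < (mx - last).toNat := pv_toNat_pos (sub_pos.mpr (not_le.mp he))
        exact Nat.add_lt_add_right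
          (pv_three_lt he' (hb 1 le_rfl) (hb 2 (by norm_num)) (hb 3 (by norm_num))) _

-- the while-stack loop of Source B: iterate pvStep until the stack is empty
def pvLoopB (adaptors : List Int) (ma : Int) (stack : List (List Int)) (result : List Int) :
    List Int :=
  match stack with
  | [] => result
  | chain :: rest =>
    pvLoopB adaptors ma (pvStep adaptors ma chain rest result).1
      (pvStep adaptors ma chain rest result).2
termination_by pvStackW ((PySem.List.max? adaptors (fun x => x)).getD 0) stack
decreasing_by exact pvStep_dec adaptors ma chain rest result

-- literal port of Source B: compute target = max(adaptors) once (an empty adaptors list raises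
-- ValueError → outside Pre_), then run the stack loop seeded with the single chain
-- current_perm and an empty result.
def find_permutations_of_adaptors_alt (adaptors : List Int) (current_perm : List Int) : List Int :=
  match PySem.List.max? adaptors (fun x => x) with
  | none => []
  | some ma => pvLoopB adaptors ma [current_perm] []

-- ===== PRECONDITION & SPEC =====
-- Pre_ excludes exactly the inputs where A raises: Python's max raises ValueError when
-- adaptors or current_perm is empty.
def Pre_find_permutations_of_adaptors (adaptors : List Int) (current_perm : List Int) : Prop :=
  adaptors ≠ [] ∧ current_perm ≠ []
instance (adaptors : List Int) (current_perm : List Int) : Decidable (Pre_find_permutations_of_adaptors adaptors current_perm) := by unfold Pre_find_permutations_of_adaptors; infer_instance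

def pvWitness_find_permutations_of_adaptors : List Int × List Int := ([1, 2, 4, 5], [0])

def Spec_find_permutations_of_adaptors (adaptors : List Int) (current_perm : List Int) (out : List Int) : Prop := out = find_permutations_of_adaptors_alt adaptors current_perm
instance (adaptors : List Int) (current_perm : List Int) (out : List Int) : Decidable (Spec_find_permutations_of_adaptors adaptors current_perm out) := by unfold Spec_find_permutations_of_adaptors; infer_instance

-- ===== CLAIM (what is proved, stated in full; the proofs are below) =====
def Claim_equal_find_permutations_of_adaptors : Prop := ∀ (adaptors : List Int) (current_perm : List Int), Dom_find_permutations_of_adaptors adaptors current_perm → Pre_find_permutations_of_adaptors adaptors current_perm → Spec_find_permutations_of_adaptors adaptors current_perm (find_permutations_of_adaptors adaptors current_perm)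

-- ===== LEMMAS AND PROOFS =====

-- Popping one (nonempty) chain contributes exactly A's preorder output for that chain, in
-- order, before the rest of the stack is processed.
lemma pvLoopB_step (adaptors : List Int) (ma : Int)
    (hA : PySem.List.max? adaptors (fun x => x) = some ma) :
    ∀ (n : Nat) (c : List Int), (ma - c.getLast?.getD 0).toNat ≤ n → c ≠ [] →
      ∀ (s : List (List Int)) (res : List Int),
        pvLoopB adaptors ma (c :: s) res
          = pvLoopB adaptors ma s (res ++ find_permutations_of_adaptors adaptors c) := by
  have hane : adaptors ≠ [] := by
    intro h
    rw [(PySem.List.max?_eq_none_iff adaptors (fun x => x)).mpr h] at hA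
    exact absurd hA (by simp)
  intro n
  induction n using Nat.strong_induction_on with
  | _ n ih =>
  intro c hn hc s res
  rcases hlE : c.getLast? with _ | last
  · exact absurd (List.getLast?_eq_none_iff.mp hlE) hc
  have hnn : (ma - last).toNat ≤ n := by simpa [hlE] using hn
  rw [pvLoopB, find_permutations_of_adaptors, pvStep]
  rw [if_neg hc, dif_neg (by simp [hc, hane] : ¬ (c = [] ∨ adaptors = []))]
  simp only [hA, Option.getD_some, hlE]
  by_cases hq : (PySem.List.max? c (fun x => x)).getD 0 = ma
  · rw [if_pos hq, if_pos hq]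
  · rw [if_neg hq, if_neg hq]
    simp only [dite_eq_ite]
    have key : ∀ (k : Int), 1 ≤ k → ∀ (s : List (List Int)) (res : List Int),
        pvLoopB adaptors ma ((if last + k ∈ adaptors then [c ++ [last + k]] else []) ++ s) res
          = pvLoopB adaptors ma s
              (res ++ (if last + k ∈ adaptors then find_permutations_of_adaptors adaptors (c ++ [last + k]) else [])) := by
      intro k hk s res
      by_cases hP : last + k ∈ adaptors
      · rw [if_pos hP, if_pos hP, List.singleton_append]
        have hub : last + k ≤ ma := by simpa using PySem.List.max?_isMax hA _ hP
        have hm : (ma - (c ++ [last + k]).getLast?.getD 0).toNat ≤ (ma - last).toNat - 1 := by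
          simp only [List.getLast?_concat, Option.getD_some]
          omega
        exact ih ((ma - last).toNat - 1) (by omega) _ hm (by simp) s res
      · rw [if_neg hP, if_neg hP]
        simp
    simp only [List.append_assoc]
    rw [key 1 (by norm_num), key 2 (by norm_num), key 3 (by norm_num)]
    simp [List.append_assoc]

-- ===== VERDICT =====

theorem find_permutations_of_adaptors_spec : Claim_equal_find_permutations_of_adaptors := by
  unfold Claim_equal_find_permutations_of_adaptors
  intro adaptors cp _dom hpre
  obtain ⟨ha, hc⟩ := hpre
  unfold Spec_find_permutations_of_adaptors find_permutations_of_adaptors_alt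
  split
  · next hA => exact absurd ((PySem.List.max?_eq_none_iff _ _).mp hA) ha
  · next ma hA =>
      rw [pvLoopB_step adaptors ma hA ((ma - cp.getLast?.getD 0).toNat) cp le_rfl hc [] []]
      rw [pvLoopB]
      simp
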